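-- pv_equiv track=rewrite | github.com/K-Kielak/gas-mains-price-modelling | gmie/preprocessing.py | expand_to_polynomial
-- ===== SOURCE A (Python) =====
-- import itertools
-- import operator
-- from functools import reduce
--
-- def expand_to_polynomial(vector, degree):
--     """
--     Expands given vector to the polynomial degree of correlations
--     (e.g. ([x1, x2], 2) to [x1, x2, x1^2, x1*x2, x2^2]).
--     """
--     expanded_data = []
--     for d in range(1, degree+1):
--         combinations = itertools.combinations_with_replacement(vector, d)
--         polynomials = [reduce(operator.mul, combination)
--                        for combination in combinations]
--         expanded_data.extend(polynomials)
--
--     return expanded_data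
-- ===== SOURCE B (Python) =====
-- def expand_to_polynomial(vector, degree):
--     """Expand vector to polynomial monomials up to given degree.
--
--     Builds each degree layer from the previous one: monomial = vector[i] times
--     a previous-layer monomial whose smallest index is >= i (found via starts);
--     no tuples are materialised and no reduce over d factors is needed.
--     """
--     out = []
--     n = len(vector)
--     prev = list(vector)          # monomials of the current degree, lexicographic
--     starts = list(range(n))      # starts[i]: where monomials with min index i begin in prev
--     d = 1
--     if degree >= 1:
--         out.extend(prev)
--     while d < degree:
--         new = []
--         new_starts = []
--         for i in range(n):
--             new_starts.append(len(new))
--             x = vector[i]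
--             new.extend([x * m for m in prev[starts[i]:]])
--         prev, starts = new, new_starts
--         out.extend(new)
--         d += 1
--     return out
-- ===== Notes on version B (the rewrite author's own statement) =====
-- stated objective: alternative
-- what changed: Replaces per-degree itertools.combinations_with_replacement plus a reduce over each d-tuple with an iterative layer-by-layer construction that multiplies each previous-layer monomial by one vector element (one multiplication per monomial, no tuples materialised).
import Mathlib
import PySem

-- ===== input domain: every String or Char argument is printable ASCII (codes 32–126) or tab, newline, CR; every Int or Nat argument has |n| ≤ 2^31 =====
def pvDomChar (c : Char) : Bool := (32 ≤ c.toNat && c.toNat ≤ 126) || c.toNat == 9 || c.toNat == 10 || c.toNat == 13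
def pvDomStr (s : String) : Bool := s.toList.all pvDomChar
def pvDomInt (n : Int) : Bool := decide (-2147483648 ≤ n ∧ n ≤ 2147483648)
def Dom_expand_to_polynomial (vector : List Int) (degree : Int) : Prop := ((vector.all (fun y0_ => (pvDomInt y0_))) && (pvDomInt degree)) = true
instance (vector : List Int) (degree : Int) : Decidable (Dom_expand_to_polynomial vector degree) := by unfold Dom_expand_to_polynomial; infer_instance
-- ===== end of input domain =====

-- B builds each degree layer from the previous one (one multiplication per monomial)
-- instead of materialising each tuple with combinations_with_replacement and reducing
-- over it; alternative algorithm, same output.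

-- ===== PORT A =====
-- itertools.combinations_with_replacement(xs, d) as the list of d-tuples, in itertools'
-- lexicographic order (tuples starting with the head come first).
def cwr (xs : List Int) (d : Nat) : List (List Int) :=
  match d, xs with
  | 0, _ => [[]]
  | _ + 1, [] => []
  | d + 1, x :: r => (cwr (x :: r) d).map (fun c => x :: c) ++ cwr r (d + 1)
termination_by (d, xs.length)

-- functools.reduce(operator.mul, l) (no initial value); l is always nonempty where used
-- (d ≥ 1), so the [] branch is unreachable.
def pyReduceMul (l : List Int) : Int :=
  match l with
  | [] => 0
  | x :: r => r.foldl (· * ·) x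

def expand_to_polynomial (vector : List Int) (degree : Int) : List Int :=
  (PySem.List.pyRange 1 (degree + 1) 1).foldl
    (fun expanded_data d => expanded_data ++ (cwr vector d.toNat).map pyReduceMul) []

-- ===== PORT B =====
-- body of the 'for i in range(n)' loop of Source B; vector[i] and starts[i] are ported as
-- pyGetD with default 0 (i ranges over 0..n-1, both lookups always in range).
def innerStep (v prev starts : List Int) (st : List Int × List Int) (i : Int) : List Int × List Int :=
  (st.1 ++ (PySem.List.slice prev (some (PySem.List.pyGetD starts i 0)) none).map
             (fun m => PySem.List.pyGetD v i 0 * m),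
   st.2 ++ [(st.1.length : Int)])

-- the 'while d < degree' loop, as fuel recursion; fuel = (degree - 1).toNat suffices
def loopB (v : List Int) (degree : Int) : Nat → List Int → List Int → List Int → Int → List Int
  | 0, _, _, out, _ => out
  | fuel + 1, prev, starts, out, d =>
      if d < degree then
        let st := (PySem.List.pyRange 0 (v.length : Int) 1).foldl (innerStep v prev starts) ([], [])
        loopB v degree fuel st.1 st.2 (out ++ st.1) (d + 1)
      else out

def expand_to_polynomial_alt (vector : List Int) (degree : Int) : List Int :=
  let prev := vector
  let starts := PySem.List.pyRange 0 (vector.length : Int) 1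
  let out := if 1 ≤ degree then prev else []
  loopB vector degree (degree - 1).toNat prev starts out 1

-- ===== PRECONDITION & SPEC =====
def Spec_expand_to_polynomial (vector : List Int) (degree : Int) (out : List Int) : Prop := out = expand_to_polynomial_alt vector degree
instance (vector : List Int) (degree : Int) (out : List Int) : Decidable (Spec_expand_to_polynomial vector degree out) := by unfold Spec_expand_to_polynomial; infer_instance

-- ===== CLAIM (what is proved, stated in full; the proofs are below) =====
def Claim_equal_expand_to_polynomial : Prop := ∀ (vector : List Int) (degree : Int), Dom_expand_to_polynomial vector degree → Spec_expand_to_polynomial vector degree (expand_to_polynomial vector degree)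

-- ===== LEMMAS AND PROOFS =====

-- the value of a combination: its product (fold from 1)
def monoOf (c : List Int) : Int := c.foldl (· * ·) 1

-- the full layer of degree-d monomials
def mono (v : List Int) (d : Nat) : List Int := (cwr v d).map monoOf

-- reference value of the starts list for the layer of degree d
def startsSpec (v : List Int) (d : Nat) : List Int :=
  (List.range v.length).map (fun i => ((cwr v d).length - (cwr (v.drop i) d).length : Int))

theorem foldl_mul_shift (l : List Int) (a b : Int) :
    l.foldl (· * ·) (a * b) = a * l.foldl (· * ·) b := by
  induction l generalizing b with
  | nil => rfl
  | cons x t ih => simp only [List.foldl_cons, mul_assoc, ih]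

theorem cwr_tail_suffix (x : Int) (r : List Int) (d : Nat) :
    cwr r d <:+ cwr (x :: r) d := by
  cases d with
  | zero => simp [cwr]
  | succ d =>
      refine ⟨(cwr (x :: r) d).map (fun c => x :: c), ?_⟩
      conv_rhs => rw [cwr]

theorem cwr_drop_suffix (i : Nat) (v : List Int) (d : Nat) :
    cwr (v.drop i) d <:+ cwr v d := by
  induction i generalizing v with
  | zero => simp
  | succ i ih =>
      cases v with
      | nil => simp
      | cons x r =>
          exact (ih r).trans (cwr_tail_suffix x r d)

theorem cwr_length_one (u : List Int) : (cwr u 1).length = u.length := by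
  induction u with
  | nil => simp [cwr]
  | cons x r ih => simp [cwr, ih]

theorem cwr_one (u : List Int) : cwr u 1 = u.map (fun x => [x]) := by
  induction u with
  | nil => simp [cwr]
  | cons x r ih => simp [cwr, ih]

theorem mono_one (v : List Int) : mono v 1 = v := by
  simp [mono, cwr_one, List.map_map, Function.comp_def, monoOf]

-- cwr at degree d+1, unrolled over the choice of the smallest index
theorem cwr_succ_drop (v : List Int) (d : Nat) :
    ∀ (k i : Nat), v.length - i ≤ k → i ≤ v.length →
      cwr (v.drop i) (d + 1)
        = (List.range' i (v.length - i)).flatMap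
            (fun j => (cwr (v.drop j) d).map (fun c => v.getD j 0 :: c)) := by
  intro k
  induction k with
  | zero =>
      intro i hk hi
      have h1 : v.length - i = 0 := by omega
      have h2 : v.drop i = [] := List.drop_eq_nil_of_le (by omega)
      simp [h1, h2, cwr]
  | succ k ihk =>
      intro i hk hi
      by_cases hlt : i < v.length
      · have hdrop : v.drop i = v.getD i 0 :: v.drop (i + 1) := by
          rw [← List.getElem_cons_drop hlt]
          simp [List.getD, List.getElem?_eq_getElem hlt]
        have hr : v.length - i = (v.length - (i + 1)) + 1 := by omega
        rw [hdrop, cwr, hr, List.range'_succ, List.flatMap_cons, ← hdrop,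
            ihk (i + 1) (by omega) (by omega)]
      · have h2 : v.drop i = [] := List.drop_eq_nil_of_le (by omega)
        have h1 : v.length - i = 0 := by omega
        simp [h1, h2, cwr]

-- generic shape of the inner for-loop: a pure double-append fold
def offs (g : Int → List Int) : List Int → Nat → List Int
  | [], _ => []
  | i :: t, base => (base : Int) :: offs g t (base + (g i).length)

theorem foldl_pair_append (g : Int → List Int) (l : List Int) :
    ∀ (N S : List Int),
      l.foldl (fun st i => (st.1 ++ g i, st.2 ++ [(st.1.length : Int)])) (N, S)
        = (N ++ l.flatMap g, S ++ offs g l N.length) := by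
  induction l with
  | nil => intro N S; simp [offs]
  | cons i t ih =>
      intro N S
      simp only [List.foldl_cons, ih, offs, List.flatMap_cons]
      simp

theorem cwr_cons_succ (x : Int) (r : List Int) (d : Nat) :
    cwr (x :: r) (d + 1) = (cwr (x :: r) d).map (fun c => x :: c) ++ cwr r (d + 1) := by
  rw [cwr]

theorem drop_eq_getD_cons (v : List Int) (i : Nat) (h : i < v.length) :
    v.drop i = v.getD i 0 :: v.drop (i + 1) := by
  rw [← List.getElem_cons_drop h]
  simp [List.getD, List.getElem?_eq_getElem h]

theorem monoOf_cons (x : Int) (c : List Int) : monoOf (x :: c) = x * monoOf c := by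
  unfold monoOf
  rw [List.foldl_cons, one_mul, ← mul_one x, foldl_mul_shift, mul_one]

-- the per-index payload of the inner loop
def gFun (v : List Int) (d : Nat) (i : Int) : List Int :=
  (PySem.List.slice (mono v d) (some (PySem.List.pyGetD (startsSpec v d) i 0)) none).map
    (fun m => PySem.List.pyGetD v i 0 * m)

theorem startsSpec_getD (v : List Int) (d : Nat) (i : Int) (h0 : 0 ≤ i)
    (hn : i < (v.length : Int)) :
    PySem.List.pyGetD (startsSpec v d) i 0
      = (((cwr v d).length : Int) - ((cwr (v.drop i.toNat) d).length : Int)) := by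
  have hlen : (startsSpec v d).length = v.length := by simp [startsSpec]
  rw [PySem.List.pyGetD_eq_getElem _ _ _ (by rw [hlen]; omega)]
  · simp [startsSpec, List.getElem_map, List.getElem_range]
  · exact h0

theorem g_eval (v : List Int) (d : Nat) (i : Int) (h0 : 0 ≤ i) (hn : i < (v.length : Int)) :
    gFun v d i = (cwr (v.drop i.toNat) d).map (fun c => monoOf (v.getD i.toNat 0 :: c)) := by
  have hsuf : cwr (v.drop i.toNat) d <:+ cwr v d := cwr_drop_suffix i.toNat v d
  have hle : (cwr (v.drop i.toNat) d).length ≤ (cwr v d).length := hsuf.length_le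
  have hx : PySem.List.pyGetD v i 0 = v.getD i.toNat 0 := by
    rw [PySem.List.pyGetD_eq_getElem _ _ _ (by omega)]
    · have : i.toNat < v.length := by omega
      simp [List.getD, List.getElem?_eq_getElem this]
    · exact h0
  unfold gFun
  rw [startsSpec_getD v d i h0 hn]
  have hcast : (((cwr v d).length : Int) - ((cwr (v.drop i.toNat) d).length : Int))
      = (((cwr v d).length - (cwr (v.drop i.toNat) d).length : Nat) : Int) := by omega
  rw [hcast, PySem.List.slice_some_none, PySem.List.clampIdx_natCast]
  have hmlen : (mono v d).length = (cwr v d).length := by simp [mono]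
  have hmin : min ((cwr v d).length - (cwr (v.drop i.toNat) d).length) (mono v d).length
      = (cwr v d).length - (cwr (v.drop i.toNat) d).length := by
    rw [hmlen]; omega
  rw [hmin]
  have hdrop : (mono v d).drop ((cwr v d).length - (cwr (v.drop i.toNat) d).length)
      = mono (v.drop i.toNat) d := by
    unfold mono
    rw [← List.map_drop]
    congr 1
    obtain ⟨t, ht⟩ := hsuf
    have h2 : (cwr v d).length - (cwr (v.drop i.toNat) d).length = t.length := by
      rw [← ht]; simp
    rw [h2, ← ht]
    simp
  rw [hdrop]
  unfold mono
  rw [List.map_map, hx]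
  apply List.map_congr_left
  intro c _
  simp [Function.comp, monoOf_cons]

theorem g_length (v : List Int) (d : Nat) (i : Int) (h0 : 0 ≤ i) (hn : i < (v.length : Int)) :
    (gFun v d i).length = (cwr (v.drop i.toNat) d).length := by
  rw [g_eval v d i h0 hn]; simp

theorem flatMap_g (v : List Int) (d : Nat) :
    (PySem.List.pyRange 0 (v.length : Int) 1).flatMap (gFun v d) = mono v (d + 1) := by
  rw [PySem.List.pyRange_zero_natCast, List.flatMap_map]
  have hcwr := cwr_succ_drop v d v.length 0 (by omega) (by omega)
  simp only [List.drop_zero, Nat.sub_zero] at hcwr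
  unfold mono
  rw [hcwr, List.map_flatMap, List.range_eq_range']
  apply List.flatMap_congr
  intro j hj
  have hj' : j < v.length := by
    have := (List.mem_range'_1.mp hj).2; omega
  show gFun v d (j : Int) = _
  rw [g_eval v d (j : Int) (by omega) (by omega)]
  have : ((j : Int)).toNat = j := by omega
  rw [this, List.map_map]
  simp [Function.comp]

theorem offs_spec (v : List Int) (d : Nat) :
    ∀ (k i : Nat), v.length - i ≤ k → i ≤ v.length →
      offs (gFun v d) (PySem.List.pyRange (i : Int) (v.length : Int) 1)
          ((cwr v (d + 1)).length - (cwr (v.drop i) (d + 1)).length)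
        = (List.range' i (v.length - i)).map
            (fun j => (((cwr v (d + 1)).length : Int) - ((cwr (v.drop j) (d + 1)).length : Int))) := by
  intro k
  induction k with
  | zero =>
      intro i hk hi
      have h1 : v.length - i = 0 := by omega
      rw [PySem.List.pyRange_one_eq_nil (by omega), h1]
      simp [offs]
  | succ k ihk =>
      intro i hk hi
      by_cases hlt : i < v.length
      · have hsplit : cwr (v.drop i) (d + 1)
            = (cwr (v.drop i) d).map (fun c => v.getD i 0 :: c) ++ cwr (v.drop (i + 1)) (d + 1) := by
          rw [drop_eq_getD_cons v i hlt, cwr_cons_succ, ← drop_eq_getD_cons v i hlt]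
        have hsuf1 : (cwr (v.drop i) (d + 1)).length ≤ (cwr v (d + 1)).length :=
          (cwr_drop_suffix i v (d + 1)).length_le
        have hr : v.length - i = (v.length - (i + 1)) + 1 := by omega
        rw [PySem.List.pyRange_one_cons (by omega), hr, List.range'_succ]
        rw [offs, List.map_cons]
        have hglen : (gFun v d (i : Int)).length = (cwr (v.drop i) d).length := by
          have := g_length v d (i : Int) (by omega) (by omega)
          simpa using this
        have hlensplit : (cwr (v.drop i) (d + 1)).length
            = (cwr (v.drop i) d).length + (cwr (v.drop (i + 1)) (d + 1)).length := by
          rw [hsplit]; simp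
        congr 1
        · omega
        · rw [hglen]
          have harg : (cwr v (d + 1)).length - (cwr (v.drop i) (d + 1)).length
                + (cwr (v.drop i) d).length
              = (cwr v (d + 1)).length - (cwr (v.drop (i + 1)) (d + 1)).length := by omega
          rw [harg, show ((i : Int) + 1) = (((i + 1 : Nat)) : Int) by push_cast; ring]
          exact ihk (i + 1) (by omega) (by omega)
      · have h1 : v.length - i = 0 := by omega
        rw [PySem.List.pyRange_one_eq_nil (by omega), h1]
        simp [offs]

-- the inner loop sends (mono v d, startsSpec v d) to (mono v (d+1), startsSpec v (d+1))
theorem inner_loop_spec (v : List Int) (d : Nat) :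
    (PySem.List.pyRange 0 (v.length : Int) 1).foldl
        (innerStep v (mono v d) (startsSpec v d)) ([], [])
      = (mono v (d + 1), startsSpec v (d + 1)) := by
  have hfun : innerStep v (mono v d) (startsSpec v d)
      = (fun (st : List Int × List Int) i => (st.1 ++ gFun v d i, st.2 ++ [(st.1.length : Int)])) := rfl
  rw [hfun, foldl_pair_append (gFun v d) _ [] []]
  rw [flatMap_g v d]
  have hoffs := offs_spec v d v.length 0 (by omega) (by omega)
  simp only [Nat.cast_zero, List.drop_zero, Nat.sub_self, Nat.sub_zero] at hoffs
  show ([] ++ mono v (d + 1), [] ++ offs (gFun v d) (PySem.List.pyRange 0 (v.length : Int) 1) 0)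
      = (mono v (d + 1), startsSpec v (d + 1))
  rw [hoffs]
  simp [startsSpec, List.range_eq_range']

-- outer loop invariant
theorem loop_spec (v : List Int) (degree : Int) :
    ∀ (fuel : Nat) (dc : Int) (out : List Int), 1 ≤ dc → degree - dc ≤ (fuel : Int) →
      loopB v degree fuel (mono v dc.toNat) (startsSpec v dc.toNat) out dc
        = out ++ (PySem.List.pyRange (dc + 1) (degree + 1) 1).flatMap
            (fun e => mono v e.toNat) := by
  intro fuel
  induction fuel with
  | zero =>
      intro dc out h1 h2
      rw [loopB, PySem.List.pyRange_one_eq_nil (by omega)]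
      simp
  | succ fuel ih =>
      intro dc out h1 h2
      rw [loopB]
      by_cases hlt : dc < degree
      · rw [if_pos hlt]
        have hk : dc.toNat + 1 = (dc + 1).toNat := by omega
        simp only [inner_loop_spec v dc.toNat, hk]
        rw [ih (dc + 1) (out ++ mono v (dc + 1).toNat) (by omega) (by omega)]
        rw [PySem.List.pyRange_one_cons (show dc + 1 < degree + 1 by omega), List.flatMap_cons]
        simp
      · rw [if_neg hlt, PySem.List.pyRange_one_eq_nil (by omega)]
        simp

-- A also computes the concatenation of the layers
theorem cwr_ne_nil (xs : List Int) (d : Nat) (hd : d ≠ 0) :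
    ∀ c ∈ cwr xs d, c ≠ [] := by
  induction xs, d using cwr.induct with
  | case1 xs => exact absurd rfl hd
  | case2 d => intro c hc; simp [cwr] at hc
  | case3 d x r ih1 ih2 =>
      intro c hc
      simp only [cwr, List.mem_append, List.mem_map] at hc
      rcases hc with ⟨c', _, rfl⟩ | hc
      · simp
      · exact ih2 (by simp) c hc

theorem pyReduceMul_eq_monoOf (c : List Int) (hc : c ≠ []) :
    pyReduceMul c = monoOf c := by
  cases c with
  | nil => exact absurd rfl hc
  | cons x r => simp [pyReduceMul, monoOf, List.foldl]

theorem portA_layers (vector : List Int) (degree : Int) :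
    expand_to_polynomial vector degree
      = (PySem.List.pyRange 1 (degree + 1) 1).flatMap (fun e => mono vector e.toNat) := by
  unfold expand_to_polynomial
  have h : (PySem.List.pyRange 1 (degree + 1) 1).foldl
        (fun o d => o ++ (cwr vector d.toNat).map pyReduceMul) ([] : List Int)
      = (PySem.List.pyRange 1 (degree + 1) 1).foldl (fun o d => o ++ mono vector d.toNat) [] := by
    apply PySem.List.foldl_congr_mem
    intro acc d hd
    have h1 : (1 : Int) ≤ d := (PySem.List.mem_pyRange_one.mp hd).1
    unfold mono
    congr 1
    exact List.map_congr_left fun c hc =>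
      pyReduceMul_eq_monoOf c (cwr_ne_nil vector d.toNat (by omega) c hc)
  rw [h, PySem.List.foldl_append_eq_flatMap, List.nil_append]

-- ===== VERDICT (by name: the statement is the Claim_ definition above) =====
theorem expand_to_polynomial_spec : Claim_equal_expand_to_polynomial := by
  intro vector degree _
  unfold Spec_expand_to_polynomial
  unfold expand_to_polynomial_alt
  by_cases hdeg : 1 ≤ degree
  · rw [portA_layers]
    simp only [if_pos hdeg]
    have hstarts : PySem.List.pyRange 0 (vector.length : Int) 1 = startsSpec vector 1 := by
      rw [PySem.List.pyRange_zero_natCast]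
      unfold startsSpec
      apply List.map_congr_left
      intro i hi
      have hi' : i < vector.length := List.mem_range.mp hi
      have hlen : (vector.drop i).length = vector.length - i := by simp
      rw [cwr_length_one, cwr_length_one, hlen]
      omega
    have hmono : vector = mono vector 1 := (mono_one vector).symm
    conv_rhs => rw [hstarts]
    have hstep : loopB vector degree (degree - 1).toNat vector (startsSpec vector 1) vector 1
        = loopB vector degree (degree - 1).toNat (mono vector ((1 : Int)).toNat)
            (startsSpec vector ((1 : Int)).toNat) (mono vector 1) 1 := by
      rw [show ((1 : Int)).toNat = 1 from rfl, ← hmono]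
    rw [hstep, loop_spec vector degree (degree - 1).toNat 1 (mono vector 1) (by omega) (by omega)]
    rw [PySem.List.pyRange_one_cons (show (1 : Int) < degree + 1 by omega), List.flatMap_cons]
    norm_num
  · rw [portA_layers]
    rw [PySem.List.pyRange_one_eq_nil (by omega)]
    simp only [if_neg hdeg]
    have : (degree - 1).toNat = 0 := by omega
    rw [this, loopB]
    simp
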